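-- pv_equiv track=rewrite | github.com/victor0198utm/LFPC | LAB 3/FAF191, Caragiu Victor, Lab_3_ex25.py | search_productive_symbols
-- ===== SOURCE A (Python) =====
-- def search_productive_symbols(elliminated_renaming, terminals):
-- 	productive_symbols = list()
-- 	for (key, value) in elliminated_renaming.items():
-- 		for result in value:
-- 			if result in terminals:
-- 				productive_symbols.append(key)
--
-- 	productive_symbols = search_productive_rules(elliminated_renaming, productive_symbols, terminals)
--
-- 	return productive_symbols
--
-- def search_productive_rules(elliminated_renaming, productive_symbols, terminals):
-- 	search_again = False
-- 	for (key, value) in elliminated_renaming.items():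
-- 		productive = False
-- 		if not key in productive_symbols:
-- 			for result in value:
-- 				productive_result = True
-- 				for symbol in result:
-- 					if not symbol in productive_symbols and not symbol in terminals:
-- 						productive_result = False
-- 				if productive_result:
-- 					productive = True
-- 		if productive:
-- 			productive_symbols.append(key)
-- 			search_again = True
--
-- 	if search_again:
-- 		productive_symbols = search_productive_rules(elliminated_renaming, productive_symbols, terminals)
--
-- 	return productive_symbols
-- ===== SOURCE B (Python) =====
-- def search_productive_symbols(elliminated_renaming, terminals):
--     productive = [key for key, value in elliminated_renaming.items()
--                   for result in value if result in terminals]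
--     # at most len(elliminated_renaming) passes can add a key, so a fixed
--     # budget of len+1 full passes reaches the fixpoint; break once a pass adds nothing
--     for _ in range(len(elliminated_renaming) + 1):
--         before = len(productive)
--         for key, value in elliminated_renaming.items():
--             if key in productive:
--                 continue
--             if any(all(symbol in productive or symbol in terminals for symbol in result)
--                    for result in value):
--                 productive.append(key)
--         if len(productive) == before:
--             break
--     return productive
-- ===== Notes on version B (the rewrite author's own statement) =====
-- stated objective: simpler
-- what changed: A's recursive helper with a search_again flag and hand-rolled per-character boolean flag loops is replaced by one function: a seed comprehension plus a bounded budget of len(grammar)+1 full passes (any/all productivity test) that breaks when a pass leaves the list's length unchanged; correct because each changing pass adds at least one key.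
import Mathlib
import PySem

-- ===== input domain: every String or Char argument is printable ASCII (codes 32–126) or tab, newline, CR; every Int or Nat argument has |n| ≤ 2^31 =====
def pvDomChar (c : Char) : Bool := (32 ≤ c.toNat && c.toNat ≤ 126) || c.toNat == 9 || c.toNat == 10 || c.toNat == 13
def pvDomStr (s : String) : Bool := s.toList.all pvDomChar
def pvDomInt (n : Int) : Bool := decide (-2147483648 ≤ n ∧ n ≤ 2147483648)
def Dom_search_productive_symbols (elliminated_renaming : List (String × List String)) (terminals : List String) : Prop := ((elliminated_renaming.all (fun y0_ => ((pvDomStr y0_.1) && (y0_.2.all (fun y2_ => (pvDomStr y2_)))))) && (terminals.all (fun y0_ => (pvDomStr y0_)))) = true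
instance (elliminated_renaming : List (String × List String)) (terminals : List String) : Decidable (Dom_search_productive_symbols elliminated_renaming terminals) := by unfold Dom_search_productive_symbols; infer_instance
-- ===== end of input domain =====

-- B replaces A's recursive fixpoint helper (search_again flag, per-character flag loops) with a
-- single function: a bounded budget of length+1 full passes that breaks when a pass keeps the
-- list's length; same return value, 'simpler'.

-- ===== PORT A =====
-- the body of A's 'for (key, value) in elliminated_renaming.items():' loop of
-- search_productive_rules, as a fold over the (productive_symbols, search_again) state
def sps_pass (d : List (String × List String)) (t : List String)
    (st : List String × Bool) : List String × Bool :=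
  d.foldl (fun st kv =>
    let productive :=
      if st.1.contains kv.1 then false
      else kv.2.foldl (fun productive result =>
        let productive_result := result.toList.foldl (fun pr symbol =>
          if !st.1.contains symbol.toString && !t.contains symbol.toString then false else pr) true
        if productive_result then true else productive) false
    if productive then (st.1 ++ [kv.1], true) else st) st

-- termination measure for A's recursion: keys of d not yet in productive_symbols
def sps_measure (d : List (String × List String)) (ps : List String) : Nat :=
  ((d.map Prod.fst).filter (fun k => !ps.contains k)).length

-- ---- lemmas cited by search_productive_rules's decreasing_by (must precede the port) ----
-- A's per-entry 'productive' flag, named so the proofs can case on it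
def sps_cond (t ps : List String) (kv : String × List String) : Bool :=
  if ps.contains kv.1 then false
  else kv.2.foldl (fun productive result =>
    if result.toList.foldl (fun pr symbol =>
      if !ps.contains symbol.toString && !t.contains symbol.toString then false else pr) true
    then true else productive) false

lemma sps_cond_fresh (t ps : List String) (kv : String × List String)
    (h : sps_cond t ps kv = true) : ps.contains kv.1 = false := by
  unfold sps_cond at h
  cases hb : ps.contains kv.1
  · rfl
  · rw [hb] at h; simp at h

lemma sps_pass_cons (t : List String) (kv : String × List String)
    (d : List (String × List String)) (ps : List String) (b : Bool) :
    sps_pass (kv :: d) t (ps, b)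
      = (if sps_cond t ps kv
         then sps_pass d t (ps ++ [kv.1], true) else sps_pass d t (ps, b)) := by
  simp only [sps_pass, List.foldl_cons]
  exact apply_ite (sps_pass d t) (sps_cond t ps kv = true) (ps ++ [kv.1], true) (ps, b)

-- everything A's pass appends is a d-key that was not yet present, and the flag
-- records exactly whether something was appended
lemma sps_pass_ext (d : List (String × List String)) (t : List String) :
    ∀ (ps : List String) (b : Bool), ∃ ex,
      sps_pass d t (ps, b) = (ps ++ ex, b || !ex.isEmpty) ∧
      ∀ k ∈ ex, k ∈ d.map Prod.fst ∧ ps.contains k = false := by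
  induction d with
  | nil => intro ps b; exact ⟨[], by simp [sps_pass], by simp⟩
  | cons kv d ih =>
    intro ps b
    rw [sps_pass_cons]
    by_cases hc : sps_cond t ps kv = true
    · rw [if_pos hc]
      rcases ih (ps ++ [kv.1]) true with ⟨ex, he, hm⟩
      refine ⟨kv.1 :: ex, ?_, ?_⟩
      · rw [he]; simp
      · intro k hk
        rcases List.mem_cons.1 hk with rfl | hk'
        · exact ⟨by simp, sps_cond_fresh t ps kv hc⟩
        · rcases hm k hk' with ⟨h1, h2⟩
          refine ⟨by simp [h1], ?_⟩
          rw [List.contains_append] at h2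
          cases hb : ps.contains k
          · rfl
          · rw [hb] at h2; simp at h2
    · rw [if_neg hc]
      rcases ih ps b with ⟨ex, he, hm⟩
      refine ⟨ex, he, ?_⟩
      intro k hk; rcases hm k hk with ⟨h1, h2⟩; exact ⟨by simp [h1], h2⟩

lemma sps_filter_le (L : List String) (p q : String → Bool)
    (h : ∀ x, q x = true → p x = true) :
    (L.filter q).length ≤ (L.filter p).length := by
  induction L with
  | nil => simp
  | cons a L ih =>
    by_cases hq : q a = true
    · simp [hq, h a hq]; omega
    · simp only [List.filter_cons, hq]
      by_cases hp : p a = true <;> simp [hp] <;> omega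

lemma sps_filter_lt (L : List String) (p q : String → Bool)
    (h : ∀ x, q x = true → p x = true)
    (k : String) (hk : k ∈ L) (hpk : p k = true) (hqk : q k = false) :
    (L.filter q).length < (L.filter p).length := by
  induction L with
  | nil => simp at hk
  | cons a L ih =>
    rcases List.mem_cons.1 hk with rfl | hk'
    · simp only [List.filter_cons, hqk, hpk]
      simp only [Bool.false_eq_true, if_false, if_true, List.length_cons]
      have := sps_filter_le L p q h
      omega
    · by_cases hq : q a = true
      · simp [hq, h a hq]
        exact ih hk'
      · simp only [List.filter_cons, hq]
        by_cases hp : p a = true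
        · simp only [hp, if_true, if_false, Bool.false_eq_true, List.length_cons]
          have := ih hk'
          omega
        · simp only [hp, Bool.false_eq_true, if_false]
          exact ih hk'

-- a pass that appends fresh keys strictly shrinks the measure
lemma sps_append_decreases (d : List (String × List String)) (ps : List String)
    (ex : List String) (hex : ex ≠ [])
    (hm : ∀ k ∈ ex, k ∈ d.map Prod.fst ∧ ps.contains k = false) :
    sps_measure d (ps ++ ex) < sps_measure d ps := by
  rcases ex with _ | ⟨k, ex'⟩
  · exact absurd rfl hex
  rcases hm k (by simp) with ⟨hk1, hk2⟩
  unfold sps_measure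
  apply sps_filter_lt (d.map Prod.fst)
    (fun x => !ps.contains x) (fun x => !(ps ++ k :: ex').contains x) ?himp k hk1 ?hp ?hq
  case hp => simpa using hk2
  case hq => simp
  case himp =>
    intro x hx
    simp only [List.contains_append, Bool.not_or, Bool.and_eq_true, Bool.not_eq_true'] at hx
    simpa using hx.1

lemma sps_pass_decreases (d : List (String × List String)) (t : List String) (ps : List String)
    (h : (sps_pass d t (ps, false)).2 = true) :
    sps_measure d (sps_pass d t (ps, false)).1 < sps_measure d ps := by
  rcases sps_pass_ext d t ps false with ⟨ex, he, hm⟩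
  rw [he] at h ⊢
  simp only [Bool.false_or] at h
  exact sps_append_decreases d ps ex
    (by rintro rfl; simp at h) hm

-- port of A's recursive helper search_productive_rules
def search_productive_rules (elliminated_renaming : List (String × List String))
    (productive_symbols : List String) (terminals : List String) : List String :=
  let st := sps_pass elliminated_renaming terminals (productive_symbols, false)
  if h : st.2 = true then
    search_productive_rules elliminated_renaming st.1 terminals
  else
    st.1
termination_by sps_measure elliminated_renaming productive_symbols
decreasing_by exact sps_pass_decreases elliminated_renaming terminals productive_symbols h

def search_productive_symbols (elliminated_renaming : List (String × List String))
    (terminals : List String) : List String :=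
  let productive_symbols :=
    elliminated_renaming.foldl (fun ps kv =>
      kv.2.foldl (fun ps result =>
        if terminals.contains result then ps ++ [kv.1] else ps) ps) []
  search_productive_rules elliminated_renaming productive_symbols terminals

-- ===== PORT B =====
-- 'all(symbol in productive or symbol in terminals for symbol in result)'
def alt_ok (terminals productive : List String) (result : String) : Bool :=
  result.toList.all (fun symbol =>
    productive.contains symbol.toString || terminals.contains symbol.toString)

-- one full 'for key, value in elliminated_renaming.items():' pass of Source B's loop body
def alt_pass (elliminated_renaming : List (String × List String)) (terminals : List String)
    (productive : List String) : List String :=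
  elliminated_renaming.foldl (fun productive kv =>
    if productive.contains kv.1 then productive
    else if kv.2.any (alt_ok terminals productive) then productive ++ [kv.1]
    else productive) productive

-- Source B's 'for _ in range(len+1): … if len unchanged: break' budget loop, fuel = iterations left
def alt_run (elliminated_renaming : List (String × List String)) (terminals : List String) :
    Nat → List String → List String
  | 0, productive => productive
  | fuel + 1, productive =>
      let productive' := alt_pass elliminated_renaming terminals productive
      if productive'.length == productive.length then productive'
      else alt_run elliminated_renaming terminals fuel productive'

def search_productive_symbols_alt (elliminated_renaming : List (String × List String))
    (terminals : List String) : List String :=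
  let seed := elliminated_renaming.flatMap (fun kv =>
    (kv.2.filter (fun result => terminals.contains result)).map (fun _ => kv.1))
  alt_run elliminated_renaming terminals (elliminated_renaming.length + 1) seed

-- ===== PRECONDITION & SPEC =====
def Spec_search_productive_symbols (elliminated_renaming : List (String × List String)) (terminals : List String) (out : List String) : Prop := out = search_productive_symbols_alt elliminated_renaming terminals
instance (elliminated_renaming : List (String × List String)) (terminals : List String) (out : List String) : Decidable (Spec_search_productive_symbols elliminated_renaming terminals out) := by unfold Spec_search_productive_symbols; infer_instance

-- ===== CLAIM (what is proved, stated in full; the proofs are below) =====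
def Claim_equal_search_productive_symbols : Prop := ∀ (elliminated_renaming : List (String × List String)) (terminals : List String), Dom_search_productive_symbols elliminated_renaming terminals → Spec_search_productive_symbols elliminated_renaming terminals (search_productive_symbols elliminated_renaming terminals)

-- ===== LEMMAS AND PROOFS =====
lemma sps_foldl_and (l : List Char) (P T : Char → Bool) (b : Bool) :
    l.foldl (fun pr c => if !P c && !T c then false else pr) b
      = (b && l.all (fun c => P c || T c)) := by
  induction l generalizing b with
  | nil => simp
  | cons c l ih =>
    rw [List.foldl_cons, List.all_cons, ih]
    cases hP : P c <;> cases hT : T c <;> simp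

lemma sps_foldl_or {α : Type} (l : List α) (p : α → Bool) (b : Bool) :
    l.foldl (fun acc x => if p x then true else acc) b = (b || l.any p) := by
  induction l generalizing b with
  | nil => simp
  | cons x l ih =>
    rw [List.foldl_cons, List.any_cons, ih]
    cases h : p x <;> simp

-- A's per-entry flag equals B's membership-and-any/all test
lemma sps_cond_eq (t ps : List String) (kv : String × List String) :
    sps_cond t ps kv = (!ps.contains kv.1 && kv.2.any (alt_ok t ps)) := by
  unfold sps_cond
  by_cases h : ps.contains kv.1 = true
  · simp only [h]
    simp
  · have h' : ps.contains kv.1 = false := by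
      cases hb : ps.contains kv.1
      · rfl
      · exact absurd hb h
    rw [h']
    simp only [Bool.false_eq_true, if_false, Bool.not_false, Bool.true_and]
    rw [sps_foldl_or kv.2 _ false, Bool.false_or]
    congr 1
    funext r
    rw [sps_foldl_and r.toList (fun c => ps.contains c.toString) (fun c => t.contains c.toString) true]
    simp [alt_ok]

-- unfolding B's pass one grammar entry at a time, through A's flag
lemma alt_pass_cons (t : List String) (kv : String × List String)
    (d : List (String × List String)) (ps : List String) :
    alt_pass (kv :: d) t ps
      = (if sps_cond t ps kv then alt_pass d t (ps ++ [kv.1]) else alt_pass d t ps) := by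
  simp only [alt_pass, List.foldl_cons, sps_cond_eq]
  cases hc : ps.contains kv.1
  · cases ha : kv.2.any (alt_ok t ps) <;> simp
  · simp

-- the productive-symbols component of A's pass equals B's flag-free pass
lemma sps_pass_fst (d : List (String × List String)) (t : List String) :
    ∀ (ps : List String) (b : Bool), (sps_pass d t (ps, b)).1 = alt_pass d t ps := by
  induction d with
  | nil => intro ps b; rfl
  | cons kv d ih =>
    intro ps b
    rw [sps_pass_cons, alt_pass_cons]
    by_cases hc : sps_cond t ps kv = true
    · rw [if_pos hc, if_pos hc, ih]
    · rw [if_neg hc, if_neg hc, ih]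

-- A's pass in terms of B's pass: same list, flag ⟺ the pass changed something
lemma sps_pass_eq (d : List (String × List String)) (t ps : List String) :
    sps_pass d t (ps, false) = (alt_pass d t ps, !decide (alt_pass d t ps = ps)) := by
  rcases sps_pass_ext d t ps false with ⟨ex, he, -⟩
  have hfst : alt_pass d t ps = ps ++ ex := by rw [← sps_pass_fst d t ps false, he]
  rw [he, hfst, Bool.false_or]
  rcases ex with _ | ⟨k, ex'⟩
  · simp
  · have : ps ++ k :: ex' ≠ ps := by
      intro hcontra
      have := congrArg List.length hcontra
      simp at this
    simp [this]

lemma alt_run_succ (d : List (String × List String)) (t : List String)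
    (fuel : Nat) (ps : List String) :
    alt_run d t (fuel + 1) ps
      = (if ((alt_pass d t ps).length == ps.length) = true
         then alt_pass d t ps else alt_run d t fuel (alt_pass d t ps)) := by
  simp [alt_run]

-- once no key is missing, A's pass is the identity with a false flag
lemma sps_measure_zero (d : List (String × List String)) (t : List String)
    (ps : List String) (h : sps_measure d ps = 0) :
    alt_pass d t ps = ps := by
  rcases sps_pass_ext d t ps false with ⟨ex, he, hm⟩
  have hfst : alt_pass d t ps = ps ++ ex := by rw [← sps_pass_fst d t ps false, he]
  rcases ex with _ | ⟨k, ex'⟩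
  · simpa using hfst
  · exfalso
    rcases hm k (by simp) with ⟨hk1, hk2⟩
    have hmem : k ∈ (d.map Prod.fst).filter (fun x => !ps.contains x) := by
      rw [List.mem_filter]
      exact ⟨hk1, by rw [hk2]; rfl⟩
    rw [List.length_eq_zero_iff.1 h] at hmem
    simp at hmem

lemma sps_rules_unfold (d : List (String × List String)) (ps t : List String) :
    search_productive_rules d ps t =
      (if (sps_pass d t (ps, false)).2 = true
       then search_productive_rules d (sps_pass d t (ps, false)).1 t
       else (sps_pass d t (ps, false)).1) := by
  rw [search_productive_rules]
  exact dite_eq_ite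

-- A's recursion-until-no-change equals B's budget loop given enough fuel
lemma sps_rules_eq_run (d : List (String × List String)) (t : List String) :
    ∀ (n : Nat) (ps : List String), sps_measure d ps ≤ n →
      search_productive_rules d ps t = alt_run d t (n + 1) ps := by
  intro n
  induction n with
  | zero =>
    intro ps h
    have hfix := sps_measure_zero d t ps (Nat.le_zero.1 h)
    rw [sps_rules_unfold, sps_pass_eq, alt_run_succ, hfix]
    simp
  | succ n ih =>
    intro ps h
    rw [sps_rules_unfold, sps_pass_eq, alt_run_succ]
    by_cases hch : alt_pass d t ps = ps
    · rw [hch]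
      simp
    · have hlen : ((alt_pass d t ps).length == ps.length) = false := by
        rcases sps_pass_ext d t ps false with ⟨ex, he, -⟩
        have hfst : alt_pass d t ps = ps ++ ex := by rw [← sps_pass_fst d t ps false, he]
        rcases ex with _ | ⟨k, ex'⟩
        · exact absurd (by simpa using hfst) hch
        · rw [hfst]
          simp only [List.length_append, beq_eq_false_iff_ne, ne_eq]
          intro hcontra
          simp at hcontra
      rw [decide_eq_false hch, hlen]
      simp only [Bool.not_false, if_true, Bool.false_eq_true, if_false]
      have hlt : sps_measure d (alt_pass d t ps) < sps_measure d ps := by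
        have := sps_pass_decreases d t ps (by rw [sps_pass_eq, decide_eq_false hch]; rfl)
        rwa [sps_pass_eq] at this
      exact ih (alt_pass d t ps) (by omega)

-- A's seed loop builds the same list as Source B's seed comprehension
lemma sps_seed_eq (d : List (String × List String)) (t : List String) :
    d.foldl (fun ps kv =>
      kv.2.foldl (fun ps result =>
        if t.contains result then ps ++ [kv.1] else ps) ps) []
    = d.flatMap (fun kv =>
      (kv.2.filter (fun result => t.contains result)).map (fun _ => kv.1)) := by
  have hfun : (fun (ps : List String) (kv : String × List String) =>
      kv.2.foldl (fun ps result => if t.contains result then ps ++ [kv.1] else ps) ps)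
      = fun ps kv => ps ++ (kv.2.filter (fun result => t.contains result)).map (fun _ => kv.1) := by
    funext ps kv
    exact PySem.List.foldl_append_if (fun result => t.contains result) (fun _ => kv.1) kv.2 ps
  rw [hfun, PySem.List.foldl_append_eq_flatMap]
  simp

lemma sps_measure_le (d : List (String × List String)) (ps : List String) :
    sps_measure d ps ≤ d.length := by
  unfold sps_measure
  calc ((d.map Prod.fst).filter _).length ≤ (d.map Prod.fst).length := List.length_filter_le _ _
    _ = d.length := List.length_map ..

-- ===== VERDICT (by name: the statement is the Claim_ definition above) =====
theorem search_productive_symbols_spec : Claim_equal_search_productive_symbols := by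
  intro d t _
  unfold Spec_search_productive_symbols search_productive_symbols search_productive_symbols_alt
  rw [sps_seed_eq]
  exact sps_rules_eq_run d t d.length _ (sps_measure_le d _)
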